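-- pv_equiv track=rewrite | github.com/apri-me/crs_calculator | crs_calculator.py | cal_cq_pts
-- ===== SOURCE A (Python) =====
-- def cal_cq_pts(clb):
--     for c in clb:
--         if c in ["Less than CLB 4"]:
--             return 0
--     for c in clb:
--         if c in ["CLB 4 or 5", "CLB 6"]:
--             return 25
--     return 50
-- ===== SOURCE B (Python) =====
-- def cal_cq_pts(clb):
--     table = {"Less than CLB 4": 0, "CLB 4 or 5": 25, "CLB 6": 25}
--     scores = [table[c] for c in clb if c in table]
--     return min(scores) if scores else 50
-- ===== Notes on version B (the rewrite author's own statement) =====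
-- stated objective: simpler
-- what changed: Replaces the two ordered early-return scans with one pass collecting table-lookup scores and taking their minimum (min encodes the 0-before-25 priority), defaulting to 50 when no known phrase appears.
import Mathlib
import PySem

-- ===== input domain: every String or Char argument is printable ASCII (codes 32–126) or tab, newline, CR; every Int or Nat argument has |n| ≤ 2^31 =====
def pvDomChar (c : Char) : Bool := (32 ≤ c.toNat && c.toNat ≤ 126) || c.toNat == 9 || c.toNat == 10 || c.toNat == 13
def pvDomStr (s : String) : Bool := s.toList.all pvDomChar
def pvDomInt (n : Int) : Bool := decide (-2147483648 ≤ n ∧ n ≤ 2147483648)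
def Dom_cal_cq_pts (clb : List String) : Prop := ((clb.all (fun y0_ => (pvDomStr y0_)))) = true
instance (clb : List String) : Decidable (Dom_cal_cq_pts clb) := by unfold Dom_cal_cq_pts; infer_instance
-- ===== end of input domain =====

-- B replaces A's two ordered early-return scans by one pass collecting table-lookup scores and taking their min (or 50) — a simpler decomposition.
-- ===== PORT A =====
-- first loop of A: returns 0 at the first "Less than CLB 4"
def calcqLoop1 : List String → Option Int
  | [] => none
  | c :: rest => if c = "Less than CLB 4" then some 0 else calcqLoop1 rest

-- second loop of A: returns 25 at the first "CLB 4 or 5"/"CLB 6"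
def calcqLoop2 : List String → Option Int
  | [] => none
  | c :: rest => if c = "CLB 4 or 5" ∨ c = "CLB 6" then some 25 else calcqLoop2 rest

def cal_cq_pts (clb : List String) : Int :=
  match calcqLoop1 clb with
  | some v => v
  | none =>
    match calcqLoop2 clb with
    | some v => v
    | none => 50

-- ===== PORT B =====
def calcqTable : PySem.Dict String Int :=
  PySem.Dict.ofList [("Less than CLB 4", 0), ("CLB 4 or 5", 25), ("CLB 6", 25)]

-- `min(scores) if scores else 50` (min of a nonempty list = left fold of `min`)
def calcqMinD : List Int → Int
  | [] => 50
  | h :: t => t.foldl min h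

def cal_cq_pts_alt (clb : List String) : Int :=
  calcqMinD (clb.filterMap (fun c => PySem.Dict.get? calcqTable c))

-- ===== PRECONDITION & SPEC =====
def Spec_cal_cq_pts (clb : List String) (out : Int) : Prop := out = cal_cq_pts_alt clb
instance (clb : List String) (out : Int) : Decidable (Spec_cal_cq_pts clb out) := by unfold Spec_cal_cq_pts; infer_instance

-- ===== CLAIM (what is proved, stated in full; the proofs are below) =====
def Claim_equal_cal_cq_pts : Prop := ∀ (clb : List String), Dom_cal_cq_pts clb → Spec_cal_cq_pts clb (cal_cq_pts clb)

-- ===== LEMMAS AND PROOFS =====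

-- the single table lookup, characterised per element
theorem calcq_get_eq (c : String) :
    PySem.Dict.get? calcqTable c =
      if c = "Less than CLB 4" then some 0
      else if c = "CLB 4 or 5" ∨ c = "CLB 6" then some 25 else none := by
  have htab : calcqTable =
      PySem.Dict.mk [("Less than CLB 4", 0), ("CLB 4 or 5", 25), ("CLB 6", 25)] := by
    decide
  rw [htab]
  by_cases h1 : c = "Less than CLB 4"
  · subst h1; decide
  by_cases h2 : c = "CLB 4 or 5"
  · subst h2; decide
  by_cases h3 : c = "CLB 6"
  · subst h3; decide
  simp [PySem.Dict.get?_mk_cons, beq_iff_eq, PySem.Dict.get?, h1, h2, h3,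
    Ne.symm h1, Ne.symm h2, Ne.symm h3]

theorem calcqLoop1_eq (clb : List String) :
    calcqLoop1 clb = if "Less than CLB 4" ∈ clb then some 0 else none := by
  induction clb with
  | nil => rfl
  | cons c rest ih =>
    simp only [calcqLoop1, ih, List.mem_cons]
    by_cases h : c = "Less than CLB 4" <;> simp [h, eq_comm]

theorem calcqLoop2_eq (clb : List String) :
    calcqLoop2 clb = if "CLB 4 or 5" ∈ clb ∨ "CLB 6" ∈ clb then some 25 else none := by
  induction clb with
  | nil => rfl
  | cons c rest ih =>
    simp only [calcqLoop2, ih, List.mem_cons]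
    by_cases h2 : c = "CLB 4 or 5" <;> by_cases h3 : c = "CLB 6" <;>
      simp [h2, h3, eq_comm, or_assoc, or_left_comm]

-- min over a list of 0s and 25s is 0 iff a 0 occurs
theorem calcq_foldl_min (t : List Int) : ∀ h : Int,
    (∀ x ∈ h :: t, x = 0 ∨ x = 25) →
    t.foldl min h = if (0 : Int) ∈ h :: t then 0 else 25 := by
  induction t with
  | nil =>
    intro h hall
    rcases hall h (by simp) with rfl | rfl <;> simp
  | cons x t ih =>
    intro h hall
    have hh := hall h (by simp)
    have hx := hall x (by simp)
    have := ih (min h x) (by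
      intro y hy
      rcases List.mem_cons.mp hy with rfl | hy
      · rcases hh with rfl | rfl <;> rcases hx with rfl | rfl <;> simp
      · exact hall y (by simp [hy]))
    simp only [List.foldl_cons, this, List.mem_cons]
    rcases hh with rfl | rfl <;> rcases hx with rfl | rfl <;> simp

-- ===== VERDICT (by name: the statement is the Claim_ definition above) =====
theorem cal_cq_pts_spec : Claim_equal_cal_cq_pts := by
  intro clb _
  unfold Spec_cal_cq_pts cal_cq_pts
  simp only [cal_cq_pts_alt]
  rw [calcqLoop1_eq, calcqLoop2_eq]
  have hmem : ∀ x : Int, x ∈ clb.filterMap (fun c => PySem.Dict.get? calcqTable c) ↔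
      (x = 0 ∧ "Less than CLB 4" ∈ clb) ∨
      (x = 25 ∧ ("CLB 4 or 5" ∈ clb ∨ "CLB 6" ∈ clb)) := by
    intro x
    simp only [List.mem_filterMap, calcq_get_eq]
    constructor
    · rintro ⟨c, hc, hx⟩
      split_ifs at hx with h1 h2
      · exact Or.inl ⟨(Option.some_inj.mp hx).symm, h1 ▸ hc⟩
      · refine Or.inr ⟨(Option.some_inj.mp hx).symm, ?_⟩
        rcases h2 with rfl | rfl
        · exact Or.inl hc
        · exact Or.inr hc
    · rintro (⟨rfl, hc⟩ | ⟨rfl, hc | hc⟩) <;> exact ⟨_, hc, by decide⟩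
  cases hsc : clb.filterMap (fun c => PySem.Dict.get? calcqTable c) with
  | nil =>
    have hless : "Less than CLB 4" ∉ clb := fun hc =>
      (List.not_mem_nil (a := (0 : Int))) (hsc ▸ (hmem 0).mpr (Or.inl ⟨rfl, hc⟩))
    have h45 : "CLB 4 or 5" ∉ clb := fun hc =>
      (List.not_mem_nil (a := (25 : Int))) (hsc ▸ (hmem 25).mpr (Or.inr ⟨rfl, Or.inl hc⟩))
    have h6 : "CLB 6" ∉ clb := fun hc =>
      (List.not_mem_nil (a := (25 : Int))) (hsc ▸ (hmem 25).mpr (Or.inr ⟨rfl, Or.inr hc⟩))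
    simp [calcqMinD, hless, h45, h6]
  | cons h t =>
    have hall : ∀ x ∈ h :: t, x = 0 ∨ x = 25 := by
      intro x hx
      rcases (hmem x).mp (hsc ▸ hx) with ⟨rfl, _⟩ | ⟨rfl, _⟩ <;> simp
    simp only [calcqMinD]
    rw [calcq_foldl_min t h hall]
    by_cases hless : "Less than CLB 4" ∈ clb
    · have h0 : (0 : Int) ∈ h :: t := hsc ▸ (hmem 0).mpr (Or.inl ⟨rfl, hless⟩)
      simp [hless, h0]
    · have h0 : (0 : Int) ∉ h :: t := by
        intro hx
        rcases (hmem 0).mp (hsc ▸ hx) with ⟨_, hc⟩ | ⟨h025, _⟩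
        · exact hless hc
        · omega
      have h25 : "CLB 4 or 5" ∈ clb ∨ "CLB 6" ∈ clb := by
        rcases (hmem h).mp (hsc ▸ List.mem_cons_self ..) with ⟨rfl, hc⟩ | ⟨_, hc⟩
        · exact absurd hc hless
        · exact hc
      simp [hless, h25, h0]
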